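-- pv_equiv track=rewrite | github.com/long-practice/llong | Algorithm/Algo_Problem/BOJ/BaekJoon_15684.py | check
-- ===== SOURCE A (Python) =====
-- def check(pos):
--     for i in range(len(pos[0]) + 1):
--         pre = i
--         for j in range(len(pos)):
--             if i < len(pos[0]) and pos[j][i]:
--                 i += 1
--             elif i > 0 and pos[j][i - 1]:
--                 i -= 1
--         if pre != i:
--             return False
--     return True
-- ===== SOURCE B (Python) =====
-- def check(pos):
--     w = len(pos[0])
--
--     def step(row, c):
--         if c < w and row[c]:
--             return c + 1
--         if c > 0 and row[c - 1]:
--             return c - 1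
--         return c
--
--     def compose(rows):
--         # maps of the rows below, composed bottom-up: compose(rows)[c] is where
--         # a token at column c, entering the first of `rows`, finally ends up
--         if not rows:
--             return list(range(w + 1))
--         below = compose(rows[1:])
--         return [below[step(rows[0], c)] for c in range(w + 1)]
--
--     return compose(pos) == list(range(w + 1))
-- ===== Notes on version B (the rewrite author's own statement) =====
-- stated objective: alternative
-- what changed: Instead of tracing each start column separately down all rows with early exit, B recursively composes the per-row maps bottom-up into one end-position lookup table (compose(rows)[c] = below[step(rows[0], c)]) and compares that table with the identity.
-- outside the precondition, e.g. on check([[0, 1], [9]]): A returns False, B raises IndexError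
import Mathlib
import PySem

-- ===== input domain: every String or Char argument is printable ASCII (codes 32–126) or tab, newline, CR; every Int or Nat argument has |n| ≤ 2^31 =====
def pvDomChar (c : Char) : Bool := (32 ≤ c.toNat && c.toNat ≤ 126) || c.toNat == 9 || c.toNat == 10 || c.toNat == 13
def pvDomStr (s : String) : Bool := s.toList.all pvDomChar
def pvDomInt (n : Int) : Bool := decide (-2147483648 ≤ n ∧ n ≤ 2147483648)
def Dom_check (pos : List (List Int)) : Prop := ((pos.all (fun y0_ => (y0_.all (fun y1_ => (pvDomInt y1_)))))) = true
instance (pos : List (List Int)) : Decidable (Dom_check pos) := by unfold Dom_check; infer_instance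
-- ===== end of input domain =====

-- B replaces A's per-start-column downward trace by a recursive bottom-up composition of the
-- per-row maps into one lookup table, compared with the identity (objective: alternative).

-- ===== PORT A =====
-- Token-major: for each start column i, trace it down all rows; fail fast if it moves.
-- (pyGetD with default 0 is exact here: Pre_check keeps every accessed index in range.)
def check (pos : List (List Int)) : Bool :=
  (PySem.List.pyRange 0 (((pos.headD []).length : Int) + 1) 1).all (fun i =>
    (pos.foldl (fun i row =>
      if i < ((pos.headD []).length : Int) ∧ PySem.List.pyGetD row i 0 ≠ 0 then i + 1
      else if i > 0 ∧ PySem.List.pyGetD row (i - 1) 0 ≠ 0 then i - 1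
      else i) i) == i)

-- ===== PORT B =====
-- One ladder row moves a token one column right, left, or not at all.
def stepB (w : Int) (row : List Int) (c : Int) : Int :=
  if c < w ∧ PySem.List.pyGetD row c 0 ≠ 0 then c + 1
  else if c > 0 ∧ PySem.List.pyGetD row (c - 1) 0 ≠ 0 then c - 1
  else c

-- compose(rows): the maps of the rows, composed bottom-up recursively; entry c is where a
-- token at column c entering the first of `rows` finally ends up. (list indexing `below[...]`
-- ported as pyGetD: the index stepB … c stays within 0..w, so it is exact.)
def compB (w : Int) : List (List Int) → List Int
  | [] => PySem.List.pyRange 0 (w + 1) 1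
  | r :: rs =>
      let below := compB w rs
      (PySem.List.pyRange 0 (w + 1) 1).map (fun c => PySem.List.pyGetD below (stepB w r c) 0)

def check_alt (pos : List (List Int)) : Bool :=
  compB ((pos.headD []).length : Int) pos
    == PySem.List.pyRange 0 (((pos.headD []).length : Int) + 1) 1

-- ===== PRECONDITION & SPEC =====
-- Pre_ excludes exactly the inputs on which the Python A raises (empty grid: pos[0] is an
-- IndexError) or may raise / returns only by accident of its trajectory (a row shorter than the
-- first row, where an IndexError is reached unless an early return preempts it; B raises there).
def Pre_check (pos : List (List Int)) : Prop :=
  pos ≠ [] ∧ ∀ row ∈ pos, (pos.headD []).length ≤ row.length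
instance (pos : List (List Int)) : Decidable (Pre_check pos) := by unfold Pre_check; infer_instance
def pvWitness_check : List (List Int) := [[1, 0], [0, 0], [1, 0]]

def Spec_check (pos : List (List Int)) (out : Bool) : Prop := out = check_alt pos
instance (pos : List (List Int)) (out : Bool) : Decidable (Spec_check pos out) := by unfold Spec_check; infer_instance

-- ===== CLAIM (what is proved, stated in full; the proofs are below) =====
def Claim_equal_check : Prop := ∀ (pos : List (List Int)), Dom_check pos → Pre_check pos → Spec_check pos (check pos)

-- ===== LEMMAS AND PROOFS =====

-- A row's map keeps a column within 0..w.
theorem stepB_bounds (w : Int) (r : List Int) (c : Int) (h0 : 0 ≤ c) (h1 : c ≤ w) :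
    0 ≤ stepB w r c ∧ stepB w r c ≤ w := by
  unfold stepB; split_ifs with h h' <;> omega

-- The bottom-up composed table is the tabulation of the top-down per-token fold.
theorem compB_eq_map_foldl (w : Int) (rows : List (List Int)) (hw : 0 ≤ w) :
    compB w rows
      = (PySem.List.pyRange 0 (w + 1) 1).map
          (fun c => rows.foldl (fun a row => stepB w row a) c) := by
  induction rows with
  | nil => simp [compB]
  | cons r rs ih =>
      show (PySem.List.pyRange 0 (w + 1) 1).map
          (fun c => PySem.List.pyGetD (compB w rs) (stepB w r c) 0) = _
      rw [ih]
      refine List.map_congr_left (fun c hc => ?_)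
      rw [PySem.List.mem_pyRange_one] at hc
      obtain ⟨hb0, hb1⟩ := stepB_bounds w r c hc.1 (by omega)
      rw [PySem.List.pyGetD_map_pyRange_of_nonneg _ _ _ _ hb0 (by omega)]
      rfl

-- List BEq against itself pointwise.
theorem map_beq_self (f : Int → Int) (l : List Int) :
    ((l.map f) == l) = l.all (fun i => f i == i) := by
  induction l with
  | nil => rfl
  | cons a l ih =>
      simp only [List.map_cons, List.all_cons, ← ih]
      show (decide (f a = a) && (l.map f == l)) = _
      rfl

-- ===== VERDICT (by name: the statement is the Claim_ definition above) =====
theorem check_spec : Claim_equal_check := by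
  intro pos _ _
  unfold Spec_check check check_alt
  rw [compB_eq_map_foldl _ _ (Int.natCast_nonneg _), map_beq_self]
  rfl
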